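-- pv_equiv track=rewrite | github.com/MrBrantCode/unitest_baseline | mut_generate/mist_train_taco/taco_9108/solution.py | count_maximums_greater_than_k
-- ===== SOURCE A (Python) =====
-- def count_maximums_greater_than_k(a, k):
--     """
--     Counts the number of maximums in all contiguous subarrays of `a` that are greater than `k`.
--
--     Parameters:
--     a (list of int): The array of integers.
--     k (int): The threshold value to compare against.
--
--     Returns:
--     int: The count of maximums greater than `k`.
--     """
--     bad = 0
--     streak = 0
--     for x in a:
--         if x > k:
--             streak = 0
--         else:
--             streak += 1
--             bad += streak
--     total_subarrays = len(a) * (len(a) + 1) // 2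
--     return total_subarrays - bad
-- ===== SOURCE B (Python) =====
-- def count_maximums_greater_than_k(a, k):
--     # Direct count (no complement): attribute each subarray whose max > k to its
--     # LEFTMOST element > k. An element at index i whose previous > k element is
--     # at prev contributes (i - prev) * (n - i) subarrays (left end in (prev, i],
--     # right end in [i, n)).
--     n = len(a)
--     ans = 0
--     prev = -1
--     for i, x in enumerate(a):
--         if x > k:
--             ans += (i - prev) * (n - i)
--             prev = i
--     return ans
-- ===== Notes on version B (the rewrite author's own statement) =====
-- stated objective: alternative
-- what changed: A counts the complement (all-<=k subarrays via a running streak) and subtracts from the n(n+1)/2 total; B counts qualifying subarrays directly, attributing each to its leftmost element > k and adding (i - prev)*(n - i) per such element, with no total/complement at all.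
import Mathlib
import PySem

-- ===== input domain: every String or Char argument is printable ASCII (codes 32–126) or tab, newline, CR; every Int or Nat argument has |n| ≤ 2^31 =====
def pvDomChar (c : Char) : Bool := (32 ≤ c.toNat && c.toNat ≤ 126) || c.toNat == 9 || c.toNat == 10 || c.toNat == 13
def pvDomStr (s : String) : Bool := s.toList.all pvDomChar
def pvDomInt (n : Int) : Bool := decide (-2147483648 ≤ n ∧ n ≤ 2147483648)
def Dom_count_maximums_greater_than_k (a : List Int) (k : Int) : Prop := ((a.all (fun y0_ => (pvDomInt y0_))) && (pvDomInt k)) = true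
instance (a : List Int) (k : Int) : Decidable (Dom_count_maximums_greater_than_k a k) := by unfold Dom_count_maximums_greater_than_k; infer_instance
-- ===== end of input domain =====

-- B counts qualifying subarrays directly by their leftmost element > k, instead of A's
-- complement count subtracted from the total (alternative algorithm, same O(n) cost).

-- ===== PORT A =====
-- single pass: streak of elements <= k, bad += streak; answer = total - bad
def count_maximums_greater_than_k (a : List Int) (k : Int) : Int :=
  let st := a.foldl (fun (st : Int × Int) x =>
    if x > k then (st.1, 0) else (st.1 + (st.2 + 1), st.2 + 1)) (0, 0)
  PySem.Int.floordiv ((a.length : Int) * ((a.length : Int) + 1)) 2 - st.1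

-- ===== PORT B =====
-- Source B's enumerate loop: state (i, prev, ans); on x > k, ans += (i - prev) * (n - i)
def pvBAux (k n : Int) : List Int → Int → Int → Int → Int
  | [], _, _, ans => ans
  | x :: xs, i, prev, ans =>
      if x > k then pvBAux k n xs (i + 1) i (ans + (i - prev) * (n - i))
      else pvBAux k n xs (i + 1) prev ans

def count_maximums_greater_than_k_alt (a : List Int) (k : Int) : Int :=
  pvBAux k (a.length : Int) a 0 (-1) 0

-- ===== PRECONDITION & SPEC =====
def Spec_count_maximums_greater_than_k (a : List Int) (k : Int) (out : Int) : Prop := out = count_maximums_greater_than_k_alt a k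
instance (a : List Int) (k : Int) (out : Int) : Decidable (Spec_count_maximums_greater_than_k a k out) := by unfold Spec_count_maximums_greater_than_k; infer_instance

-- ===== CLAIM (what is proved, stated in full; the proofs are below) =====
def Claim_equal_count_maximums_greater_than_k : Prop := ∀ (a : List Int) (k : Int), Dom_count_maximums_greater_than_k a k → Spec_count_maximums_greater_than_k a k (count_maximums_greater_than_k a k)

-- ===== LEMMAS AND PROOFS =====

-- triangular number via Python floor division
def pvT (s : Int) : Int := PySem.Int.floordiv (s * (s + 1)) 2

theorem pvT_val (s t : Int) (h : s * (s + 1) = 2 * t) : pvT s = t := by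
  unfold pvT
  rw [h, PySem.Int.floordiv_eq_ediv_of_pos (by norm_num)]
  exact Int.mul_ediv_cancel_left t (by norm_num)

theorem pvT_zero : pvT 0 = 0 := pvT_val 0 0 (by ring)

theorem pvT_succ (s : Int) : pvT (s + 1) = pvT s + (s + 1) := by
  obtain ⟨t, ht⟩ := Int.even_mul_succ_self s
  have hT : pvT s = t := pvT_val s t (by omega)
  have hT1 : pvT (s + 1) = t + (s + 1) := pvT_val (s + 1) (t + (s + 1)) (by nlinarith)
  omega

-- joint invariant: with prev = i - 1 - s, B's remaining direct count plus A's remaining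
-- complement count equals the number of subarrays (l, r) with i - s ≤ l ≤ r < n
theorem pv_key (k : Int) : ∀ (xs : List Int) (i s b ans n : Int), n = i + (xs.length : Int) →
    pvBAux k n xs i (i - 1 - s) ans
      + (xs.foldl (fun (st : Int × Int) x =>
          if x > k then (st.1, 0) else (st.1 + (st.2 + 1), st.2 + 1)) (b, s)).1
    = ans + b + (xs.length : Int) * s + pvT (xs.length : Int) := by
  intro xs
  induction xs with
  | nil =>
    intro i s b ans n _
    simp [pvBAux, pvT_zero]
  | cons x xs ih =>
    intro i s b ans n hn
    have hm : ((x :: xs).length : Int) = (xs.length : Int) + 1 := by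
      push_cast [List.length_cons]; ring
    by_cases hx : x > k
    · simp only [pvBAux, List.foldl, hx, if_true]
      have hp : (i + 1) - 1 - (0 : Int) = i := by ring
      have := ih (i + 1) 0 b (ans + (i - (i - 1 - s)) * (n - i)) n (by rw [hn, hm]; ring)
      rw [hp] at this
      rw [this, hm, pvT_succ]
      have hni : n - i = (xs.length : Int) + 1 := by rw [hn, hm]; ring
      rw [hni]; ring
    · simp only [pvBAux, List.foldl, hx, if_false]
      have hp : i - 1 - s = (i + 1) - 1 - (s + 1) := by ring
      rw [hp]
      have := ih (i + 1) (s + 1) (b + (s + 1)) ans n (by rw [hn, hm]; ring)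
      rw [this, hm, pvT_succ]
      ring

-- ===== VERDICT (by name: the statement is the Claim_ definition above) =====
theorem count_maximums_greater_than_k_spec : Claim_equal_count_maximums_greater_than_k := by
  intro a k _
  unfold Spec_count_maximums_greater_than_k count_maximums_greater_than_k count_maximums_greater_than_k_alt
  have h := pv_key k a 0 0 0 0 (a.length : Int) (by ring)
  have hp : (0 : Int) - 1 - 0 = -1 := by ring
  rw [hp] at h
  have hT : PySem.Int.floordiv ((a.length : Int) * ((a.length : Int) + 1)) 2 = pvT (a.length : Int) := rfl
  simp only []
  omega
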